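-- pv_equiv track=rewrite | github.com/daniel-lee-dl/Advent-2020 | Day 6/Day6.py | part_2
-- ===== SOURCE A (Python) =====
-- def part_2 (answers):
--     numAnswers = 0
--
--     # Create a set to store all the answers in, because a set cannot contain duplicates
--     distinctAnswers = set()
--
--     # For part 2, if there are more than one consecutive answers, only the letter in all answers matter
--     # Create an indicator to detect if the answer is the first one in the entire group
--     firstAnswer = True
--
--     for answer in answers:
--         # An empty string will indicate that there is a newline character. This indicates the end of the answers for one group
--         # Also, an empty string indicates that the current group of answers is at its end. So set the first answer indicator to true
--         if (answer == ""):
--             numAnswers += len(distinctAnswers)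
--             distinctAnswers.clear()
--             firstAnswer = True
--         else:
--             if (firstAnswer == True):
--                 for letter in answer:
--                     distinctAnswers.add(letter)
--                     firstAnswer = False
--             # If any of the answers from the first entry in the group is not found in any subsequent answers, remove them from the set
--             else:
--                 distinctAnswersCopy = distinctAnswers.copy()
--                 for letter in distinctAnswersCopy:
--                     if (letter not in answer):
--                         distinctAnswers.remove(letter)
--
--     # If the last element is not a newline, then the final answer set would be missed, so check for that:
--     if (answers[-1] != ""):
--         numAnswers += len(distinctAnswers)
--
--     return numAnswers
-- ===== SOURCE B (Python) =====
-- def part_2(answers):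
--     # Group lines between blank-line separators; finalize each group with a
--     # letter-frequency map and count letters whose frequency equals the group size.
--     total = 0
--     group = []
--     for answer in list(answers) + [""]:
--         if answer == "":
--             if group != []:
--                 counts = {}
--                 for member in group:
--                     for ch in set(member):
--                         counts[ch] = counts.get(ch, 0) + 1
--                 n = 0
--                 for v in counts.values():
--                     if v == len(group):
--                         n += 1
--                 total += n
--                 group = []
--         else:
--             group.append(answer)
--     return total
-- ===== Notes on version B (the rewrite author's own statement) =====
-- stated objective: alternative
-- what changed: Replaces A's running set-intersection with explicit grouping at blank-line boundaries plus a per-group letter-frequency dictionary compared against the group size.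
import Mathlib
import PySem

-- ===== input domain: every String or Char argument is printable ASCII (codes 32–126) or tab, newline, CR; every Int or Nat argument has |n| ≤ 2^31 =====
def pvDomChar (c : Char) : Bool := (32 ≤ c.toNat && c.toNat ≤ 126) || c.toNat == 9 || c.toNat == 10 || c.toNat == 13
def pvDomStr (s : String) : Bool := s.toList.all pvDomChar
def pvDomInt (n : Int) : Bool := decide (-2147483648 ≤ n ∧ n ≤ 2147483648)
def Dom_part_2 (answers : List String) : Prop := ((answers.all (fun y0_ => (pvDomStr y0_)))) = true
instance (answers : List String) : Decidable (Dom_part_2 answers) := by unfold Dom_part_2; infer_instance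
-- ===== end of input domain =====

-- B replaces A's running set-intersection with grouping at blank lines plus a per-group
-- letter-frequency dictionary compared against the group size (alternative, similar cost).

-- ===== PORT A =====
-- inner loop 'for letter in answer: distinctAnswers.add(letter); firstAnswer = False'
def part2InnerAdd (p : PySem.Set Char × Bool) (c : Char) : PySem.Set Char × Bool :=
  (PySem.Set.add p.1 c, false)
-- copy loop 'for letter in distinctAnswersCopy: if letter not in answer: distinctAnswers.remove(letter)'
-- set.remove never raises here (each letter of the duplicate-free copy is removed at most once), so discard is exact
def part2InnerRemove (answer : String) (s : PySem.Set Char) : PySem.Set Char :=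
  List.foldl (fun t c => if answer.toList.contains c then t else PySem.Set.discard t c) s s

def part2Step (st : Int × PySem.Set Char × Bool) (answer : String) : Int × PySem.Set Char × Bool :=
  if answer = "" then (st.1 + (st.2.1.length : Int), PySem.Set.empty, true)
  else if st.2.2 then (st.1, answer.toList.foldl part2InnerAdd (st.2.1, st.2.2))
  else (st.1, part2InnerRemove answer st.2.1, st.2.2)

def part2Loop (answers : List String) : Int × PySem.Set Char × Bool :=
  answers.foldl part2Step (0, PySem.Set.empty, true)

def part_2 (answers : List String) : Int :=
  match PySem.List.pyGet? answers (-1) with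
  | some last =>
      if last ≠ "" then (part2Loop answers).1 + ((part2Loop answers).2.1.length : Int)
      else (part2Loop answers).1
  | none => (part2Loop answers).1   -- answers == []: Python raises IndexError; excluded by Pre_part_2

-- ===== PORT B =====
-- finalize one group: letter-frequency dict, count letters with frequency == len(group)
def altCounts (group : List String) : PySem.Dict Char Int :=
  group.foldl (fun d m =>
    (PySem.Set.ofList m.toList).foldl (fun d ch => d.insert ch (d.getD ch 0 + 1)) d)
    PySem.Dict.empty

def altCount (group : List String) : Int :=
  (altCounts group).values.foldl (fun n v => if v = (group.length : Int) then n + 1 else n) 0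

def altStep (st : Int × List String) (answer : String) : Int × List String :=
  if answer = "" then
    if st.2 ≠ [] then (st.1 + altCount st.2, []) else st
  else (st.1, st.2 ++ [answer])

def part_2_alt (answers : List String) : Int :=
  ((answers ++ [""]).foldl altStep (0, [])).1

-- ===== PRECONDITION & SPEC =====
-- Pre_ excludes only the empty list, on which A's 'answers[-1]' raises IndexError
def Pre_part_2 (answers : List String) : Prop := answers ≠ []
instance (answers : List String) : Decidable (Pre_part_2 answers) := by unfold Pre_part_2; infer_instance
def pvWitness_part_2 : List String := ["ab", "b", "", "c"]

def Spec_part_2 (answers : List String) (out : Int) : Prop := out = part_2_alt answers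
instance (answers : List String) (out : Int) : Decidable (Spec_part_2 answers out) := by unfold Spec_part_2; infer_instance

-- ===== CLAIM (what is proved, stated in full; the proofs are below) =====
def Claim_equal_part_2 : Prop := ∀ (answers : List String), Dom_part_2 answers → Pre_part_2 answers → Spec_part_2 answers (part_2 answers)

-- ===== LEMMAS AND PROOFS =====

-- A's per-group state: the set and firstAnswer flag after feeding the group's lines
def groupState (g : List String) : PySem.Set Char × Bool :=
  g.foldl (fun p m =>
    if p.2 then m.toList.foldl part2InnerAdd p
    else (part2InnerRemove m p.1, p.2)) (PySem.Set.empty, true)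

lemma addFold_eq (cs : List Char) (s : PySem.Set Char) (b : Bool) :
    cs.foldl part2InnerAdd (s, b) = (PySem.Set.update s cs, b && cs.isEmpty) := by
  induction cs generalizing s b with
  | nil => simp [PySem.Set.update]
  | cons c cs ih =>
    simp only [List.foldl_cons, part2InnerAdd, ih, PySem.Set.update_cons]
    simp

lemma mem_removeLoop (answer : String) (u t : List Char) (x : Char) :
    x ∈ u.foldl (fun t c => if answer.toList.contains c then t else PySem.Set.discard t c) t ↔
      x ∈ t ∧ (x ∈ answer.toList ∨ x ∉ u) := by
  induction u generalizing t with
  | nil => simp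
  | cons c u ih =>
    simp only [List.foldl_cons]
    by_cases hc : answer.toList.contains c
    · rw [if_pos hc, ih]
      by_cases hx : x = c
      · subst hx
        simp [List.contains_iff_mem.mp hc]
      · simp [hx]
    · rw [if_neg hc, ih]
      by_cases hx : x = c
      · subst hx
        simp only [PySem.Set.mem_discard]
        constructor
        · rintro ⟨⟨_, hne⟩, _⟩; exact absurd rfl hne
        · rintro ⟨ht, h | h⟩
          · exact absurd (List.contains_iff_mem.mpr h) hc
          · exact absurd (List.mem_cons_self) h
      · simp [PySem.Set.mem_discard, hx]

lemma nodup_removeLoop (answer : String) (u t : List Char) (h : t.Nodup) :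
    (u.foldl (fun t c => if answer.toList.contains c then t else PySem.Set.discard t c) t).Nodup := by
  induction u generalizing t with
  | nil => exact h
  | cons c u ih =>
    simp only [List.foldl_cons]
    split
    · exact ih t h
    · exact ih _ (PySem.Set.nodup_discard _ _ h)

lemma mem_innerRemove (answer : String) (s : PySem.Set Char) (x : Char) :
    x ∈ part2InnerRemove answer s ↔ x ∈ s ∧ x ∈ answer.toList := by
  unfold part2InnerRemove
  rw [mem_removeLoop]
  constructor
  · rintro ⟨hs, h | h⟩
    · exact ⟨hs, h⟩
    · exact absurd hs h
  · rintro ⟨hs, h⟩; exact ⟨hs, Or.inl h⟩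

lemma nodup_innerRemove (answer : String) (s : PySem.Set Char) (h : s.Nodup) :
    (part2InnerRemove answer s).Nodup := nodup_removeLoop answer s s h

-- fold of part2Step's else-branch once the flag is false
lemma removeFoldPair (rest : List String) (s : PySem.Set Char) :
    rest.foldl (fun p m =>
      if p.2 then m.toList.foldl part2InnerAdd p
      else (part2InnerRemove m p.1, p.2)) ((s, false) : PySem.Set Char × Bool)
      = (rest.foldl (fun s m => part2InnerRemove m s) s, false) := by
  induction rest generalizing s with
  | nil => rfl
  | cons m rest ih => simp only [List.foldl_cons, if_neg (by simp : ¬ (false = true))]; exact ih _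

lemma toList_ne_nil {m : String} (h : m ≠ "") : m.toList ≠ [] := by
  intro hn; apply h; cases m with | _ l => simp_all

lemma groupState_cons (m₀ : String) (rest : List String) (h : m₀ ≠ "") :
    groupState (m₀ :: rest)
      = (rest.foldl (fun s m => part2InnerRemove m s) (PySem.Set.ofList m₀.toList), false) := by
  unfold groupState
  simp only [List.foldl_cons, if_pos rfl]
  rw [addFold_eq]
  have h1 : m₀.toList.isEmpty = false := by
    simp [List.isEmpty_iff, toList_ne_nil h]
  rw [h1]
  simp only [Bool.and_false, PySem.Set.update_nil_left]
  exact removeFoldPair rest _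

lemma groupState_snd_false {g : List String} (hne : g ≠ []) (hm : ∀ m ∈ g, m ≠ "") :
    (groupState g).2 = false := by
  cases g with
  | nil => exact absurd rfl hne
  | cons m rest => rw [groupState_cons m rest (hm m (by simp))]

lemma groupState_nil : groupState [] = (PySem.Set.empty, true) := rfl

lemma part2Step_blank (n : Int) (st : PySem.Set Char × Bool) :
    part2Step (n, st) "" = (n + (st.1.length : Int), PySem.Set.empty, true) := by
  simp [part2Step]

lemma part2Step_true (n : Int) (s : PySem.Set Char) {a : String} (ha : a ≠ "") :
    part2Step (n, s, true) a = (n, a.toList.foldl part2InnerAdd (s, true)) := by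
  simp [part2Step, ha]

lemma part2Step_false (n : Int) (s : PySem.Set Char) {a : String} (ha : a ≠ "") :
    part2Step (n, s, false) a = (n, part2InnerRemove a s, false) := by
  simp [part2Step, ha]

lemma groupState_single (a : String) :
    groupState [a] = a.toList.foldl part2InnerAdd (PySem.Set.empty, true) := by
  unfold groupState; simp

lemma groupState_append {g : List String} (a : String) (h2 : (groupState g).2 = false) :
    groupState (g ++ [a]) = (part2InnerRemove a (groupState g).1, false) := by
  have h : groupState (g ++ [a])
      = (fun (p : PySem.Set Char × Bool) m =>
          if p.2 then m.toList.foldl part2InnerAdd p else (part2InnerRemove m p.1, p.2)) (groupState g) a := by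
    unfold groupState; rw [List.foldl_append]; rfl
  rw [h]
  simp [h2]

lemma mem_removeFold (rest : List String) (s : PySem.Set Char) (x : Char) :
    x ∈ rest.foldl (fun s m => part2InnerRemove m s) s ↔
      x ∈ s ∧ ∀ m ∈ rest, x ∈ m.toList := by
  induction rest generalizing s with
  | nil => simp
  | cons m rest ih =>
    simp only [List.foldl_cons, ih, mem_innerRemove, List.mem_cons]
    constructor
    · rintro ⟨⟨hs, hm⟩, hr⟩
      exact ⟨hs, by rintro m' (rfl | hm'); exact hm; exact hr m' hm'⟩
    · rintro ⟨hs, hall⟩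
      exact ⟨⟨hs, hall m (Or.inl rfl)⟩, fun m' hm' => hall m' (Or.inr hm')⟩

lemma nodup_removeFold (rest : List String) (s : PySem.Set Char) (h : s.Nodup) :
    (rest.foldl (fun s m => part2InnerRemove m s) s).Nodup := by
  induction rest generalizing s with
  | nil => exact h
  | cons m rest ih => exact ih _ (nodup_innerRemove m s h)

-- ---- B-side characterisation ----

lemma countLoop_eq_countP (l : List Int) (L : Int) (n : Int) :
    l.foldl (fun n v => if v = L then n + 1 else n) n = n + (l.countP (fun v => v = L) : Int) := by
  induction l generalizing n with
  | nil => simp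
  | cons v l ih =>
    simp only [List.foldl_cons, List.countP_cons, ih]
    by_cases h : v = L <;> simp [h] <;> ring

lemma foldl_flatMap' {α β γ : Type} (l : List α) (f : α → List β) (g : γ → β → γ) (init : γ) :
    l.foldl (fun acc a => (f a).foldl g acc) init = (l.flatMap f).foldl g init := by
  induction l generalizing init with
  | nil => rfl
  | cons a l ih => simp [List.flatMap_cons, List.foldl_append, ih]

lemma count_flatMap_dedup (g : List String) (c : Char) :
    (g.flatMap (fun m => PySem.Set.ofList m.toList)).count c
      = g.countP (fun m => c ∈ m.toList) := by
  induction g with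
  | nil => rfl
  | cons m g ih =>
    rw [List.flatMap_cons, List.count_append, List.countP_cons, ih]
    have : (PySem.Set.ofList m.toList).count c = if c ∈ m.toList then 1 else 0 := by
      by_cases h : c ∈ m.toList
      · rw [if_pos h]
        exact List.count_eq_one_of_mem (PySem.Set.nodup_ofList _) (by rw [PySem.Set.mem_ofList]; exact h)
      · rw [if_neg h, List.count_eq_zero]
        rw [PySem.Set.mem_ofList]; exact h
    rw [this]
    by_cases h : c ∈ m.toList <;> simp [h] <;> omega

lemma altCount_eq (g : List String) :
    altCount g = (((PySem.Set.ofList (g.flatMap fun m => PySem.Set.ofList m.toList)).filter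
      (fun c => g.all (fun m => m.toList.contains c))).length : Int) := by
  unfold altCount altCounts
  have hfm := foldl_flatMap' (γ := PySem.Dict Char Int) g (fun m => PySem.Set.ofList m.toList)
        (fun d ch => d.insert ch (d.getD ch 0 + 1)) PySem.Dict.empty
  rw [hfm]
  set L := g.flatMap (fun m => PySem.Set.ofList m.toList) with hL
  set counts : PySem.Dict Char Int := L.foldl (fun d ch => d.insert ch (d.getD ch 0 + 1)) PySem.Dict.empty with hc
  have hkeys : counts.keys = PySem.Set.ofList L := by
    rw [hc, PySem.Dict.keys_foldl_insert]
    simp [PySem.Set.update_nil_left]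
  have hnd : counts.keys.Nodup := by rw [hkeys]; exact PySem.Set.nodup_ofList L
  have hget : ∀ c, counts.getD c 0 = (L.count c : Int) := by
    intro c
    rw [hc, PySem.Dict.getD_foldl_insert_add_one]
    simp
  rw [PySem.Dict.values_eq_map_keys counts hnd 0, countLoop_eq_countP, List.countP_map, hkeys]
  rw [List.countP_congr (q := fun c => g.all (fun m => m.toList.contains c))]
  · simp [List.countP_eq_length_filter]
  · intro c _
    simp only [Function.comp_apply, hget, decide_eq_true_eq]
    rw [show List.count c L = g.countP (fun m => c ∈ m.toList) from count_flatMap_dedup g c,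
        Nat.cast_inj, List.countP_eq_length, List.all_eq_true]
    simp

-- A's flushed value equals B's per-group count
lemma flushEq {g : List String} (hne : g ≠ []) (hm : ∀ m ∈ g, m ≠ "") :
    ((groupState g).1.length : Int) = altCount g := by
  obtain ⟨m₀, rest, rfl⟩ : ∃ m₀ rest, g = m₀ :: rest := by
    cases g with
    | nil => exact absurd rfl hne
    | cons a b => exact ⟨a, b, rfl⟩
  rw [altCount_eq, groupState_cons m₀ rest (hm m₀ (by simp))]
  congr 1
  apply List.Perm.length_eq
  rw [List.perm_ext_iff_of_nodup]
  · intro x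
    rw [mem_removeFold, List.mem_filter]
    simp only [PySem.Set.mem_ofList, List.mem_flatMap, List.all_eq_true, List.contains_iff_mem]
    constructor
    · rintro ⟨h0, hr⟩
      refine ⟨⟨m₀, by simp, h0⟩, ?_⟩
      intro m hm'
      rcases List.mem_cons.mp hm' with rfl | hm'
      · exact h0
      · exact hr m hm'
    · rintro ⟨-, hall⟩
      exact ⟨hall m₀ (by simp), fun m hm' => hall m (by simp [hm'])⟩
  · exact nodup_removeFold rest _ (PySem.Set.nodup_ofList _)
  · exact List.Nodup.filter _ (PySem.Set.nodup_ofList _)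

-- coupled loop invariant: A's fold state = (B's total, replay of B's open group), flag = group empty
lemma mainInv (answers : List String) (n : Int) (g : List String) (hm : ∀ m ∈ g, m ≠ "") :
    answers.foldl part2Step (n, groupState g)
        = ((answers.foldl altStep (n, g)).1, groupState (answers.foldl altStep (n, g)).2)
      ∧ (∀ m ∈ (answers.foldl altStep (n, g)).2, m ≠ "") := by
  induction answers generalizing n g with
  | nil => exact ⟨rfl, hm⟩
  | cons a answers ih =>
    simp only [List.foldl_cons]
    by_cases ha : a = ""
    · subst ha
      rw [show ((n, groupState g) : Int × PySem.Set Char × Bool) = (n, ((groupState g).1, (groupState g).2)) from rfl,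
          part2Step_blank]
      by_cases hg : g = []
      · subst hg
        rw [show altStep (n, ([] : List String)) "" = (n, []) from by simp [altStep]]
        have hz : (n + (((groupState ([] : List String)).1).length : Int)) = n := by
          rw [groupState_nil]; simp [PySem.Set.empty]
        rw [hz, ← groupState_nil]
        exact ih n [] (by simp)
      · rw [show altStep (n, g) "" = (n + altCount g, []) from by simp [altStep, hg]]
        rw [flushEq hg hm, ← groupState_nil]
        exact ih _ [] (by simp)
    · by_cases hg : g = []
      · subst hg
        rw [show ((n, groupState ([] : List String)) : Int × PySem.Set Char × Bool)
              = (n, PySem.Set.empty, true) from rfl,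
            part2Step_true n _ ha, ← groupState_single]
        rw [show altStep (n, ([] : List String)) a = (n, [a]) from by simp [altStep, ha]]
        exact ih n [a] (by simpa using ha)
      · have h2 : (groupState g).2 = false := groupState_snd_false hg hm
        rw [show ((n, groupState g) : Int × PySem.Set Char × Bool)
              = (n, (groupState g).1, false) from by rw [← h2],
            part2Step_false n _ ha, ← groupState_append a h2]
        rw [show altStep (n, g) a = (n, g ++ [a]) from by simp [altStep, ha]]
        refine ih n (g ++ [a]) ?_
        intro m hm2
        rcases List.mem_append.mp hm2 with h | h
        · exact hm m h
        · simp at h; subst h; exact ha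

-- ===== VERDICT (by name: the statement is the Claim_ definition above) =====
theorem part_2_spec : Claim_equal_part_2 := by
  intro answers _ hpre
  unfold Spec_part_2 part_2 part_2_alt
  obtain rfl | ⟨init, last, rfl⟩ := answers.eq_nil_or_concat
  · exact absurd rfl hpre
  simp only [List.concat_eq_append]
  obtain ⟨hfold, hne⟩ := mainInv (init ++ [last]) 0 [] (by simp)
  have hloop : part2Loop (init ++ [last])
      = (((init ++ [last]).foldl altStep (0, [])).1,
         groupState ((init ++ [last]).foldl altStep (0, [])).2) := by
    unfold part2Loop
    rw [← groupState_nil]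
    exact hfold
  have hlastget : PySem.List.pyGet? (init ++ [last]) (-1) = some last := by
    simp [PySem.List.pyGet?, PySem.List.pyIdx?]
  simp only [hlastget]
  set B := (init ++ [last]).foldl altStep (0, []) with hB
  rw [List.foldl_append (l' := [""]), ← hB]
  simp only [List.foldl_cons, List.foldl_nil]
  by_cases hl : last = ""
  · subst hl
    have hB2 : B.2 = [] := by
      rw [hB, List.foldl_append]
      simp only [List.foldl_cons, List.foldl_nil, altStep]
      split
      · split <;> simp_all
      · simp_all
    rw [if_neg (by simp), hloop, hB2]
    simp only [altStep, groupState_nil, PySem.Set.empty]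
    rw [hB2]
    simp
  · have hB2 : B.2 ≠ [] := by
      rw [hB, List.foldl_append]
      simp [altStep, hl]
    rw [if_pos hl, hloop]
    rw [show altStep B "" = (B.1 + altCount B.2, []) from by simp [altStep, hB2]]
    rw [flushEq hB2 hne]
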